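-- pv_equiv track=rewrite | github.com/cubejar/GitOps_Learning | python/myacademy/04-Methods-and-Functions/Z-Project-Assignments/Function-Capitalize-the-word.py | capitalize_macDonald
-- ===== SOURCE A (Python) =====
-- def capitalize_macDonald(name):
--     str = ''
--     for index,letter in enumerate(name):
--         if index == 0 or index == 3:
--             str = str + letter.upper()
--         else:
--             str = str + letter
--     return str
-- ===== SOURCE B (Python) =====
-- def capitalize_macDonald(name):
--     return name[:1].upper() + name[1:3] + name[3:4].upper() + name[4:]
-- ===== Notes on version B (the rewrite author's own statement) =====
-- stated objective: simpler
-- what changed: Replaces the per-character enumerate loop with repeated string concatenation by a single closed-form slicing expression that uppercases name[:1] and name[3:4] and concatenates four slices.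
import Mathlib
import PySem

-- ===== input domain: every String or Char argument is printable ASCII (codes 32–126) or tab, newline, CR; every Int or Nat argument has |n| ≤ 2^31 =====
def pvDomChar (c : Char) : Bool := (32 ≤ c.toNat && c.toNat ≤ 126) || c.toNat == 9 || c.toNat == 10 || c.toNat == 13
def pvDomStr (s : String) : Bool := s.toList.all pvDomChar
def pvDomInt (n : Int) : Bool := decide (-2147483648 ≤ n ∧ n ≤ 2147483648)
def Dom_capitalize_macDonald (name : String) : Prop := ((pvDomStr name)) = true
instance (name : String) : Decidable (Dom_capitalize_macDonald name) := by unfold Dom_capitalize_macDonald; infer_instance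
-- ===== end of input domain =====

-- B replaces A's per-character enumerate loop by one closed-form slicing expression (simpler).

-- ===== PORT A =====
-- loop body: str = str + letter.upper() if index in {0,3} else str + letter
def capAStep (acc : List Char) (p : Int × Char) : List Char :=
  if p.1 == 0 || p.1 == 3 then acc ++ PySem.Chars.upper [p.2] else acc ++ [p.2]

def capitalize_macDonald (name : String) : String :=
  String.ofList ((PySem.List.enumerate name.toList 0).foldl capAStep [])

-- ===== PORT B =====
-- name[:1].upper() + name[1:3] + name[3:4].upper() + name[4:] on code points
def capitalize_macDonald_alt (name : String) : String :=
  let cs := name.toList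
  String.ofList (PySem.Chars.upper (PySem.List.slice cs none (some 1))
    ++ PySem.List.slice cs (some 1) (some 3)
    ++ PySem.Chars.upper (PySem.List.slice cs (some 3) (some 4))
    ++ PySem.List.slice cs (some 4) none)

-- ===== PRECONDITION & SPEC =====
def Spec_capitalize_macDonald (name : String) (out : String) : Prop := out = capitalize_macDonald_alt name
instance (name : String) (out : String) : Decidable (Spec_capitalize_macDonald name out) := by unfold Spec_capitalize_macDonald; infer_instance

-- ===== CLAIM (what is proved, stated in full; the proofs are below) =====
def Claim_equal_capitalize_macDonald : Prop := ∀ (name : String), Dom_capitalize_macDonald name → Spec_capitalize_macDonald name (capitalize_macDonald name)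

-- ===== LEMMAS AND PROOFS =====

-- from index ≥ 4 on, A's loop appends every remaining character unchanged
lemma capA_tail (rest : List Char) (s : Int) (acc : List Char) (h : 4 ≤ s) :
    (PySem.List.enumerate rest s).foldl capAStep acc = acc ++ rest := by
  induction rest generalizing s acc with
  | nil => simp [PySem.List.enumerate_nil]
  | cons x xs ih =>
    rw [PySem.List.enumerate_cons]
    have h0 : (s == 0 || s == 3) = false := by
      simp only [Bool.or_eq_false_iff, beq_eq_false_iff_ne]
      constructor <;> omega
    simp only [List.foldl_cons, capAStep, h0, Bool.false_eq_true, if_false]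
    rw [ih (s + 1) _ (by omega)]
    exact (List.append_cons acc x xs).symm

lemma cap_eq (name : String) :
    capitalize_macDonald name = capitalize_macDonald_alt name := by
  unfold capitalize_macDonald capitalize_macDonald_alt
  match hcs : name.toList with
  | [] => simp [PySem.List.enumerate_nil, PySem.List.slice, PySem.Chars.upper]
  | [a] =>
      simp [PySem.List.enumerate_cons, PySem.List.enumerate_nil, capAStep,
        PySem.List.slice, PySem.List.clampIdx, PySem.Chars.upper]
  | [a, b] =>
      simp [PySem.List.enumerate_cons, PySem.List.enumerate_nil, capAStep,
        PySem.List.slice, PySem.List.clampIdx, PySem.Chars.upper]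
  | [a, b, c] =>
      simp [PySem.List.enumerate_cons, PySem.List.enumerate_nil, capAStep,
        PySem.List.slice, PySem.List.clampIdx, PySem.Chars.upper]
  | a :: b :: c :: d :: rest =>
      simp only [PySem.List.enumerate_cons, List.foldl_cons, capAStep]
      norm_num
      rw [capA_tail rest 4 _ (by omega)]
      simp [PySem.List.slice, PySem.List.clampIdx, PySem.Chars.upper, ← String.ofList_append]

-- ===== VERDICT (by name: the statement is the Claim_ definition above) =====
theorem capitalize_macDonald_spec : Claim_equal_capitalize_macDonald := by
  intro name _
  exact cap_eq name
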